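-- pv_equiv track=rewrite | github.com/santoshr1016/WeekendMasala | itsybitsy/TH/prob1.py | check_ops_negative
-- ===== SOURCE A (Python) =====
-- import math
--
-- def find_divisors(n):
--     result = []
--     i = 1
--     while i <= math.sqrt(n):
--         if n % i == 0:
--             # If divisors are equal, print only one
--             if n / i == i:
--                 result.append(i)
--             else:
--                 # Otherwise print both
--                 result.append(i)
--                 result.append(n // i)
--         i += 1
--     return len(result)
--
-- def check_ops_negative(num, K):
--     ops = 0
--     while True:
--         if find_divisors(num - 1) == K:
--             return True, ops - 1
--         elif find_divisors(num - 1) > K: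
--             return False, ops
--         elif find_divisors(num - 1) < K:
--             num -= 1
--         ops += 1
-- ===== SOURCE B (Python) =====
-- def _count_divisors(n):
--     # divisor count via prime factorization: product of (exponent + 1)
--     if n <= 0:
--         return 0
--     total = 1
--     i = 2
--     while i * i <= n:
--         if n % i == 0:
--             e = 0
--             while n % i == 0:
--                 n //= i
--                 e += 1
--             total *= e + 1
--         i += 1
--     if n > 1:
--         total *= 2
--     return total
--
-- def check_ops_negative(num, K):
--     ops = 0
--     m = num - 1
--     while m >= 0:
--         d = _count_divisors(m)
--         if d == K:
--             return True, ops - 1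
--         if d > K:
--             return False, ops
--         m -= 1
--         ops += 1
--     raise ValueError("divisor count never reaches K")
-- ===== Notes on version B (the rewrite author's own statement) =====
-- stated objective: alternative
-- what changed: The divisor-count helper is replaced by a different algorithm: instead of collecting a list of divisor pairs by scanning all i up to sqrt(n), B trial-divides out each prime factor while maintaining a running product of (exponent+1), so the scan bound shrinks as factors are removed and no list is built; the outer loop scans m = num-1 downward explicitly instead of mutating num inside a while True.
import Mathlib
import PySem

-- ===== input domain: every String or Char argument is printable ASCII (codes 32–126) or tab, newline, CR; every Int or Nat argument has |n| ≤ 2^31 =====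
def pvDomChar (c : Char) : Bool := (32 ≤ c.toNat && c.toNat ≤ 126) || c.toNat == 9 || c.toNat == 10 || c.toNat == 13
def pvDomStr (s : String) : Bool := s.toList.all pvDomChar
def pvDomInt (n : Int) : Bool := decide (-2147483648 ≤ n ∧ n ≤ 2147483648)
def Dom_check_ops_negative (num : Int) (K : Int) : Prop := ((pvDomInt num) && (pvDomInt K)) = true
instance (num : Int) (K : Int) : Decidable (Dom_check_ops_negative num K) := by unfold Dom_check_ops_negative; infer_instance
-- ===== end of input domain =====

-- B replaces A's sqrt-scan divisor-pair list with prime factorization (product of exponent+1),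
-- a different algorithm of similar cost; the equivalence is about the RETURN value (neither
-- implementation mutates its arguments).

-- ===== PORT A =====
-- 'while i <= math.sqrt(n)': on the admitted inputs (0 ≤ n ≤ 2^31) math.sqrt is accurate enough
-- that the float comparison agrees with i ≤ Nat.sqrt n.toNat; 'n / i' (float true division)
-- under the guard 'n % i == 0' is the exact integer n // i, ported as PySem.Int.floordiv.
def fdAux (n : Int) (s : Nat) (i : Nat) (result : List Int) : List Int :=
  if i ≤ s then
    fdAux n s (i + 1)
      (if PySem.Int.mod n i = 0 then
        (if PySem.Int.floordiv n i = (i : Int) then result ++ [(i : Int)]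
         else (result ++ [(i : Int)]) ++ [PySem.Int.floordiv n i])
       else result)
  else result
termination_by s + 1 - i

-- for n < 0 Python raises ValueError (math.sqrt of a negative number); excluded by Pre_
def find_divisors (n : Int) : Int := ((fdAux n (Nat.sqrt n.toNat) 1 []).length : Int)

-- 'while True' loop; the fuel is a totality guard only, sufficient on every input Pre_ admits
def coLoop (fuel : Nat) (num : Int) (K : Int) (ops : Int) : Bool × Int :=
  match fuel with
  | 0 => (false, ops)
  | fuel + 1 =>
    if find_divisors (num - 1) = K then (true, ops - 1)
    else if find_divisors (num - 1) > K then (false, ops)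
    else if find_divisors (num - 1) < K then coLoop fuel (num - 1) K (ops + 1)
    else coLoop fuel num K (ops + 1)   -- unreachable by trichotomy

def check_ops_negative (num : Int) (K : Int) : Bool × Int :=
  coLoop (num.toNat + 1) num K 0

-- ===== PORT B =====
-- inner 'while n % i == 0: n //= i; e += 1' of _count_divisors
def divOut (n : Nat) (i : Nat) : Nat × Nat :=
  if h : 2 ≤ i ∧ i ∣ n ∧ 1 ≤ n then
    let r := divOut (n / i) i
    (r.1, r.2 + 1)
  else (n, 0)
termination_by n
decreasing_by exact Nat.div_lt_self (by omega) (by omega)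

theorem divOut_fst_le (n i : Nat) : (divOut n i).1 ≤ n := by
  induction n using Nat.strong_induction_on with
  | _ n ih =>
    rw [divOut]
    split
    · next h =>
      exact le_trans (ih (n / i) (Nat.div_lt_self (by omega) (by omega))) (Nat.div_le_self n i)
    · exact le_refl n

theorem divOut_fst_lt (n i : Nat) (h2 : 2 ≤ i) (hd : i ∣ n) (h1 : 1 ≤ n) :
    (divOut n i).1 < n := by
  rw [divOut]
  split
  · next h =>
    exact lt_of_le_of_lt (divOut_fst_le (n / i) i) (Nat.div_lt_self (by omega) (by omega))
  · next h => exact absurd ⟨h2, hd, h1⟩ h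

-- outer 'while i * i <= n' loop of _count_divisors, carrying the running product acc
def factLoop (n : Nat) (i : Nat) (acc : Nat) : Nat :=
  if h : 2 ≤ i ∧ i * i ≤ n then
    if hd : i ∣ n then
      factLoop (divOut n i).1 (i + 1) (acc * ((divOut n i).2 + 1))
    else factLoop n (i + 1) acc
  else if 1 < n then acc * 2 else acc
termination_by (n, n - i)
decreasing_by
  · exact Prod.Lex.left _ _ (divOut_fst_lt n i h.1 hd (by obtain ⟨a, b⟩ := h; nlinarith))
  · refine Prod.Lex.right n ?_
    obtain ⟨a, b⟩ := h
    have hi : i < i * i := by nlinarith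
    omega

def bCount (n : Int) : Int :=
  if n ≤ 0 then 0 else Int.ofNat (factLoop n.toNat 2 1)

-- downward scan over m = num-1, num-2, …; when the scan is exhausted Python raises ValueError
def bLoop (m : Nat) (K : Int) (ops : Int) : Bool × Int :=
  if bCount (m : Int) = K then (true, ops - 1)
  else if bCount (m : Int) > K then (false, ops)
  else
    match m with
    | 0 => (false, ops)          -- Python raises ValueError here; outside Pre_
    | m' + 1 => bLoop m' K (ops + 1)

def check_ops_negative_alt (num : Int) (K : Int) : Bool × Int :=
  if num - 1 < 0 then (false, 0)  -- Python raises ValueError here; outside Pre_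
  else bLoop (num - 1).toNat K 0

-- ===== PRECONDITION & SPEC =====
-- number of divisors of n (τ); used by Pre_ to state A's termination condition mathematically
def tau (n : Nat) : Nat := n.divisors.card

-- ---- A's helper counts divisors: weight contributed by index i of the sqrt scan ----
def wA (N i : Nat) : Nat := if i ∣ N then (if i * i = N then 1 else 2) else 0

-- ---- the sqrt-scan weights sum to τ(N): divisors d with d² > N pair off with N/d ----
theorem sumWA_eq_tau (N : Nat) :
    ∑ j ∈ Finset.Ico 1 (Nat.sqrt N + 1), wA N j = tau N := by
  rcases Nat.eq_zero_or_pos N with h0 | hN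
  · subst h0
    simp [tau]
  · have hfilter : (Finset.Ico 1 (Nat.sqrt N + 1)).filter (fun d => d ∣ N)
        = N.divisors.filter (fun d => d * d ≤ N) := by
      ext d
      simp only [Finset.mem_filter, Finset.mem_Ico, Nat.mem_divisors, Nat.lt_succ_iff]
      constructor
      · rintro ⟨⟨h1, h2⟩, h3⟩
        exact ⟨⟨h3, by omega⟩, Nat.le_sqrt.mp h2⟩
      · rintro ⟨⟨h1, h2⟩, h3⟩
        exact ⟨⟨Nat.pos_of_dvd_of_pos h1 hN, Nat.le_sqrt.mpr h3⟩, h1⟩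
    have hsum : ∑ j ∈ Finset.Ico 1 (Nat.sqrt N + 1), wA N j
        = ∑ d ∈ N.divisors.filter (fun d => d * d ≤ N), (if d * d = N then 1 else 2) := by
      rw [← hfilter, Finset.sum_filter]
      simp only [wA]
    set Sle := N.divisors.filter (fun d => d * d ≤ N) with hSle
    set Sgt := N.divisors.filter (fun d => ¬ d * d ≤ N) with hSgt
    have hcardsplit : Sle.card + Sgt.card = tau N := by
      rw [hSle, hSgt, Finset.card_filter_add_card_filter_not]
      rfl
    have hc_add : (Sle.filter (fun d => d * d = N)).card
        + (Sle.filter (fun d => ¬ d * d = N)).card = Sle.card :=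
      Finset.card_filter_add_card_filter_not _
    have hlt_eq : Sle.filter (fun d => ¬ d * d = N) = N.divisors.filter (fun d => d * d < N) := by
      rw [hSle, Finset.filter_filter]
      apply Finset.filter_congr
      intro d _
      constructor
      · rintro ⟨a, b⟩; omega
      · intro h; constructor <;> omega
    -- the reflection d ↦ N / d is a bijection between {d ∣ N, d² > N} and {d ∣ N, d² < N}
    have hbij : Sgt.card = (N.divisors.filter (fun d => d * d < N)).card := by
      apply Finset.card_bij' (i := fun d _ => N / d) (j := fun d _ => N / d)
      · intro d hd
        rw [hSgt, Finset.mem_filter, Nat.mem_divisors] at hd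
        obtain ⟨⟨hdvd, hN0⟩, hgt⟩ := hd
        have hq : d * (N / d) = N := Nat.mul_div_cancel' hdvd
        have hd0 : 0 < d := Nat.pos_of_dvd_of_pos hdvd hN
        have hq0 : 0 < N / d := Nat.div_pos (Nat.le_of_dvd hN hdvd) hd0
        have hlt : N / d < d := by nlinarith
        rw [Finset.mem_filter, Nat.mem_divisors]
        exact ⟨⟨Nat.div_dvd_of_dvd hdvd, hN0⟩, by nlinarith⟩
      · intro d hd
        rw [Finset.mem_filter, Nat.mem_divisors] at hd
        obtain ⟨⟨hdvd, hN0⟩, hlt⟩ := hd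
        have hq : d * (N / d) = N := Nat.mul_div_cancel' hdvd
        have hd0 : 0 < d := Nat.pos_of_dvd_of_pos hdvd hN
        have hq0 : 0 < N / d := Nat.div_pos (Nat.le_of_dvd hN hdvd) hd0
        have hgt : d < N / d := by nlinarith
        rw [hSgt, Finset.mem_filter, Nat.mem_divisors]
        exact ⟨⟨Nat.div_dvd_of_dvd hdvd, hN0⟩, by nlinarith⟩
      · intro d hd
        rw [hSgt, Finset.mem_filter, Nat.mem_divisors] at hd
        exact Nat.div_div_self hd.1.1 hd.1.2
      · intro d hd
        rw [Finset.mem_filter, Nat.mem_divisors] at hd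
        exact Nat.div_div_self hd.1.1 hd.1.2
    have hval : ∑ d ∈ Sle, (if d * d = N then (1:ℕ) else 2)
        = (Sle.filter (fun d => d * d = N)).card * 1
          + (Sle.filter (fun d => ¬ d * d = N)).card * 2 := by
      rw [Finset.sum_ite, Finset.sum_const, Finset.sum_const, smul_eq_mul, smul_eq_mul]
    have hlt_card : (Sle.filter (fun d => ¬ d * d = N)).card
        = (N.divisors.filter (fun d => d * d < N)).card := by rw [hlt_eq]
    rw [hsum, hval]
    omega

-- fast evaluators used ONLY by Pre_'s Decidable instance (proved equal to τ / Nat.sqrt below;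
-- fuel-structural and tail-recursive so both the kernel and the evaluator can run them)
def tauCAux : Nat → Nat → Nat → Nat → Nat
  | 0, _, _, acc => acc
  | f + 1, m, j, acc =>
    if j * j ≤ m then
      tauCAux f m (j + 1) (acc + (if m % j = 0 then (if j * j = m then 1 else 2) else 0))
    else acc

def tauS (m : Nat) : Nat := tauCAux (m + 1) m 1 0

def isqrtAux : Nat → Nat → Nat → Nat
  | 0, _, j => j
  | f + 1, m, j => if (j + 1) * (j + 1) ≤ m then isqrtAux f m (j + 1) else j

def isqrt (m : Nat) : Nat := isqrtAux m m 0

def preWitUp : Nat → Nat → Nat → Int → Bool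
  | 0, _, _, _ => false
  | f + 1, n, m, K =>
    if m ≤ n then decide (K ≤ ((tauS m : Nat) : Int)) || preWitUp f n (m + 1) K
    else false

def preWit (n : Nat) (K : Int) : Bool := preWitUp n n 1 K

theorem tauCAux_eq (f m : Nat) : ∀ j acc, 1 ≤ j → m + 1 ≤ f + j →
    tauCAux f m j acc = acc + ∑ k ∈ Finset.Ico j (Nat.sqrt m + 1), wA m k := by
  induction f with
  | zero =>
    intro j acc hj hf
    have hempty : Finset.Ico j (Nat.sqrt m + 1) = ∅ := by
      apply Finset.Ico_eq_empty
      have : Nat.sqrt m ≤ m := Nat.sqrt_le_self m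
      omega
    simp [tauCAux, hempty]
  | succ f ih =>
    intro j acc hj hf
    rw [tauCAux]
    by_cases h : j * j ≤ m
    · have hjs : j ≤ Nat.sqrt m := Nat.le_sqrt.mpr h
      rw [if_pos h, Finset.sum_eq_sum_Ico_succ_bot (show j < Nat.sqrt m + 1 by omega) (wA m),
        ih (j + 1) _ (by omega) (by omega)]
      have hwa : (if m % j = 0 then (if j * j = m then 1 else 2) else 0) = wA m j := by
        unfold wA
        by_cases hd : j ∣ m
        · rw [if_pos ((Nat.dvd_iff_mod_eq_zero ..).mp hd), if_pos hd]
        · rw [if_neg (fun hc => hd ((Nat.dvd_iff_mod_eq_zero ..).mpr hc)), if_neg hd]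
      rw [hwa]
      omega
    · have hjs : Nat.sqrt m < j := by
        rcases Nat.lt_or_ge (Nat.sqrt m) j with hh | hh
        · exact hh
        · exact absurd (le_trans (Nat.mul_le_mul hh hh) (Nat.sqrt_le m)) h
      rw [if_neg h]
      have hempty : Finset.Ico j (Nat.sqrt m + 1) = ∅ := by
        apply Finset.Ico_eq_empty; omega
      simp [hempty]

theorem tauS_eq_tau (m : Nat) : tauS m = tau m := by
  unfold tauS
  rw [tauCAux_eq (m + 1) m 1 0 (by omega) (by omega), sumWA_eq_tau]
  omega

theorem isqrtAux_eq (m : Nat) : ∀ f j, j * j ≤ m → Nat.sqrt m ≤ f + j →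
    isqrtAux f m j = Nat.sqrt m := by
  intro f
  induction f with
  | zero =>
    intro j hj hf
    have : j ≤ Nat.sqrt m := Nat.le_sqrt.mpr hj
    rw [isqrtAux]
    omega
  | succ f ih =>
    intro j hj hf
    rw [isqrtAux]
    by_cases h : (j + 1) * (j + 1) ≤ m
    · rw [if_pos h]
      exact ih (j + 1) h (by omega)
    · rw [if_neg h]
      have h1 : j ≤ Nat.sqrt m := Nat.le_sqrt.mpr hj
      have h2 : Nat.sqrt m < j + 1 := by
        rcases Nat.lt_or_ge (Nat.sqrt m) (j + 1) with hh | hh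
        · exact hh
        · exact absurd (le_trans (Nat.mul_le_mul hh hh) (Nat.sqrt_le m)) h
      omega

theorem isqrt_eq (m : Nat) : isqrt m = Nat.sqrt m :=
  isqrtAux_eq m m 0 (by omega) (by simpa using Nat.sqrt_le_self m)

theorem tau_le_two_sqrt (m : Nat) : tau m ≤ 2 * Nat.sqrt m := by
  rw [← sumWA_eq_tau m]
  calc ∑ j ∈ Finset.Ico 1 (Nat.sqrt m + 1), wA m j
      ≤ ∑ j ∈ Finset.Ico 1 (Nat.sqrt m + 1), 2 := by
        refine Finset.sum_le_sum fun j _ => ?_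
        unfold wA
        split_ifs <;> omega
    _ = 2 * Nat.sqrt m := by
        rw [Finset.sum_const, Nat.card_Ico, smul_eq_mul]
        omega

theorem preWitUp_iff (n : Nat) (K : Int) : ∀ f m, 1 ≤ m → n + 1 ≤ f + m →
    (preWitUp f n m K = true ↔ ∃ x ∈ Finset.Icc m n, K ≤ (tau x : Int)) := by
  intro f
  induction f with
  | zero =>
    intro m hm hf
    have hempty : Finset.Icc m n = ∅ := by
      apply Finset.Icc_eq_empty; omega
    simp [preWitUp, hempty]
  | succ f ih =>
    intro m hm hf
    rw [preWitUp]
    by_cases h : m ≤ n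
    · rw [if_pos h, Bool.or_eq_true, decide_eq_true_iff, tauS_eq_tau,
        ih (m + 1) (by omega) (by omega)]
      constructor
      · rintro (hK | ⟨x, hx, hK⟩)
        · exact ⟨m, by simp only [Finset.mem_Icc]; omega, hK⟩
        · exact ⟨x, by simp only [Finset.mem_Icc] at hx ⊢; omega, hK⟩
      · rintro ⟨x, hx, hK⟩
        simp only [Finset.mem_Icc] at hx
        rcases Nat.lt_or_ge m x with hlt | hge
        · exact Or.inr ⟨x, by simp only [Finset.mem_Icc]; omega, hK⟩
        · refine Or.inl ?_
          have hxe : x = m := by omega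
          rwa [← hxe]
    · rw [if_neg h]
      have hempty : Finset.Icc m n = ∅ := by
        apply Finset.Icc_eq_empty; omega
      simp [hempty]

theorem preWit_iff (n : Nat) (K : Int) :
    preWit n K = true ↔ ∃ m ∈ Finset.Icc 1 n, K ≤ (tau m : Int) :=
  preWitUp_iff n K n 1 (by omega) (by omega)

-- Pre_ excludes EXACTLY the inputs on which A raises ValueError (math.sqrt of a negative
-- number): num ≤ 0, where the very first find_divisors(num-1) call gets a negative argument,
-- and K ≥ 1 with no m in [1, num-1] having at least K divisors, where the decrement loop runs
-- past zero; B raises ValueError on exactly the same inputs.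
def Pre_check_ops_negative (num : Int) (K : Int) : Prop :=
  1 ≤ num ∧ (K ≤ 0 ∨ ∃ m ∈ Finset.Icc 1 (num - 1).toNat, (K : Int) ≤ (tau m : Int))
instance (num : Int) (K : Int) : Decidable (Pre_check_ops_negative num K) :=
  decidable_of_iff
    (1 ≤ num ∧ (K ≤ 0 ∨
      (K ≤ 2 * (isqrt (num - 1).toNat : Int) ∧ preWit (num - 1).toNat K = true)))
    (by
      unfold Pre_check_ops_negative
      refine and_congr Iff.rfl (or_congr Iff.rfl ?_)
      rw [preWit_iff]
      constructor
      · rintro ⟨-, hw⟩; exact hw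
      · rintro ⟨m, hm, hK⟩
        refine ⟨?_, ⟨m, hm, hK⟩⟩
        simp only [Finset.mem_Icc] at hm
        have h1 : tau m ≤ 2 * Nat.sqrt m := tau_le_two_sqrt m
        have h2 : Nat.sqrt m ≤ Nat.sqrt (num - 1).toNat := Nat.sqrt_le_sqrt hm.2
        rw [isqrt_eq]
        have : (tau m : Int) ≤ 2 * (Nat.sqrt (num - 1).toNat : Int) := by
          have := le_trans h1 (Nat.mul_le_mul_left 2 h2)
          exact_mod_cast this
        omega)

def pvWitness_check_ops_negative : Int × Int := (10, 2)

def Spec_check_ops_negative (num : Int) (K : Int) (out : Bool × Int) : Prop := out = check_ops_negative_alt num K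
instance (num : Int) (K : Int) (out : Bool × Int) : Decidable (Spec_check_ops_negative num K out) := by unfold Spec_check_ops_negative; infer_instance

-- ===== CLAIM (what is proved, stated in full; the proofs are below) =====
def Claim_equal_check_ops_negative : Prop := ∀ (num : Int) (K : Int), Dom_check_ops_negative num K → Pre_check_ops_negative num K → Spec_check_ops_negative num K (check_ops_negative num K)

-- ===== LEMMAS AND PROOFS =====

theorem fdAux_length (N : Nat) (s : Nat) (i : Nat) (hi : 1 ≤ i) (r : List Int) :
    (fdAux (N : Int) s i r).length = r.length + ∑ j ∈ Finset.Ico i (s + 1), wA N j := by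
  fun_induction fdAux (N : Int) s i r with
  | case1 i r hle ih =>
    have ih' := ih (by omega)
    simp only [dite_eq_ite] at ih'
    rw [ih']
    rw [Finset.sum_eq_sum_Ico_succ_bot (show i < s + 1 by omega) (wA N)]
    have hmod : PySem.Int.mod (N : Int) (i : Int) = ((N % i : Nat) : Int) :=
      PySem.Int.mod_natCast N i
    have hdivv : PySem.Int.floordiv (N : Int) (i : Int) = ((N / i : Nat) : Int) :=
      PySem.Int.floordiv_natCast N i
    by_cases hdvd : i ∣ N
    · have hm0 : PySem.Int.mod (N : Int) (i : Int) = 0 := by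
        rw [hmod]
        simp only [Int.natCast_eq_zero]
        exact Nat.eq_zero_of_dvd_of_lt hdvd |> fun _ => Nat.mod_eq_zero_of_dvd hdvd
      by_cases hsq : i * i = N
      · have hfe : PySem.Int.floordiv (N : Int) (i : Int) = (i : Int) := by
          rw [hdivv]
          simp only [Int.natCast_inj]
          rw [(Nat.div_eq_iff_eq_mul_left (by omega) hdvd)]
          omega
        simp only [if_pos hm0, if_pos hfe, wA, if_pos hdvd, if_pos hsq, List.length_append,
          List.length_cons, List.length_nil]
        omega
      · have hfe : ¬ PySem.Int.floordiv (N : Int) (i : Int) = (i : Int) := by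
          rw [hdivv]
          simp only [Int.natCast_inj]
          rw [(Nat.div_eq_iff_eq_mul_left (by omega) hdvd)]
          omega
        simp only [if_pos hm0, if_neg hfe, wA, if_pos hdvd, if_neg hsq, List.length_append,
          List.length_cons, List.length_nil]
        omega
    · have hm0 : ¬ PySem.Int.mod (N : Int) (i : Int) = 0 := by
        rw [hmod]
        simp only [Int.natCast_eq_zero]
        intro hc
        exact hdvd (Nat.dvd_iff_mod_eq_zero.mpr hc)
      simp only [if_neg hm0, wA, if_neg hdvd]
      omega
  | case2 i r hle =>
    have : Finset.Ico i (s + 1) = ∅ := by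
      apply Finset.Ico_eq_empty; omega
    simp [this]

theorem find_divisors_eq (m : Nat) : find_divisors (m : Int) = (tau m : Int) := by
  unfold find_divisors
  rw [show ((m : Int)).toNat = m from Int.toNat_natCast m]
  rw [fdAux_length m (Nat.sqrt m) 1 (by omega) []]
  simp [sumWA_eq_tau m]

-- ---- B's helper counts divisors: τ is multiplicative over the factors divided out ----
theorem tau_pow_mul (p e m : Nat) (hp : p.Prime) (hm : ¬ p ∣ m) :
    tau (p ^ e * m) = (e + 1) * tau m := by
  have hcop : (p ^ e).Coprime m := Nat.Coprime.pow_left e ((Nat.Prime.coprime_iff_not_dvd hp).mpr hm)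
  unfold tau
  rw [Nat.Coprime.card_divisors_mul hcop, Nat.divisors_prime_pow hp]
  simp

theorem prime_of_no_small_factor (n i : Nat) (h1 : 1 < n) (hii : n < i * i)
    (hp : ∀ p, p.Prime → p ∣ n → i ≤ p) : n.Prime := by
  have hne : n ≠ 1 := by omega
  set p := n.minFac with hpdef
  have hpp : p.Prime := Nat.minFac_prime hne
  have hpd : p ∣ n := Nat.minFac_dvd n
  have hq : p * (n / p) = n := Nat.mul_div_cancel' hpd
  have hqd : n / p ∣ n := Nat.div_dvd_of_dvd hpd
  have hq1 : 1 ≤ n / p := Nat.one_le_div_iff hpp.pos |>.mpr (Nat.le_of_dvd (by omega) hpd)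
  by_cases hq2 : n / p = 1
  · rw [hq2, mul_one] at hq; rw [← hq]; exact hpp
  · exfalso
    have hqq : (n / p).minFac.Prime := Nat.minFac_prime hq2
    have : (n / p).minFac ∣ n := dvd_trans (Nat.minFac_dvd _) hqd
    have hi1 : i ≤ p := hp p hpp hpd
    have hi2 : i ≤ (n / p).minFac := hp _ hqq this
    have : (n / p).minFac ≤ n / p := Nat.minFac_le (by omega)
    have : i * i ≤ p * (n / p) := Nat.mul_le_mul hi1 (by omega)
    omega

theorem divOut_spec (n i : Nat) (h2 : 2 ≤ i) (h1 : 1 ≤ n) :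
    n = i ^ (divOut n i).2 * (divOut n i).1 ∧ ¬ i ∣ (divOut n i).1
      ∧ 1 ≤ (divOut n i).1 ∧ (i ∣ n → 1 ≤ (divOut n i).2) := by
  induction n using Nat.strong_induction_on with
  | _ n ih =>
    rw [divOut]
    split
    · next h =>
      obtain ⟨-, hd, -⟩ := h
      have hlt : n / i < n := Nat.div_lt_self (by omega) (by omega)
      have h1' : 1 ≤ n / i := Nat.one_le_div_iff (by omega) |>.mpr (Nat.le_of_dvd (by omega) hd)
      obtain ⟨e1, e2, e3, _⟩ := ih (n / i) hlt h1'
      refine ⟨?_, e2, e3, fun _ => by simp⟩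
      simp only [pow_succ]
      calc n = i * (n / i) := (Nat.mul_div_cancel' hd).symm
        _ = i * (i ^ (divOut (n/i) i).2 * (divOut (n/i) i).1) := by rw [← e1]
        _ = i ^ (divOut (n/i) i).2 * i * (divOut (n/i) i).1 := by ring
    · next h =>
      have hnd : ¬ i ∣ n := fun hd => h ⟨h2, hd, h1⟩
      exact ⟨by simp, hnd, h1, fun hd => absurd hd hnd⟩

-- invariant of the trial-division loop: every prime factor of n is ≥ i
theorem factLoop_eq (n i acc : Nat) (h2 : 2 ≤ i) (h1 : 1 ≤ n)
    (hp : ∀ p, p.Prime → p ∣ n → i ≤ p) :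
    factLoop n i acc = acc * tau n := by
  fun_induction factLoop n i acc with
  | case1 n i acc h hd ih =>
    obtain ⟨hi2, hii⟩ := h
    obtain ⟨e1, e2, e3, e4⟩ := divOut_spec n i hi2 h1
    have hiprime : i.Prime := by
      rw [Nat.prime_def_minFac]
      refine ⟨hi2, ?_⟩
      have h1' : i.minFac ∣ n := dvd_trans (Nat.minFac_dvd i) hd
      have h2' : i ≤ i.minFac := hp _ (Nat.minFac_prime (by omega)) h1'
      have h3' : i.minFac ≤ i := Nat.minFac_le (by omega)
      omega
    have hdn : (divOut n i).1 ∣ n := by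
      have : (divOut n i).1 ∣ i ^ (divOut n i).2 * (divOut n i).1 := Dvd.intro_left _ rfl
      rw [← e1] at this; exact this
    have hp' : ∀ p, p.Prime → p ∣ (divOut n i).1 → i + 1 ≤ p := by
      intro p pp pd
      have hip : i ≤ p := hp p pp (dvd_trans pd hdn)
      rcases Nat.lt_or_ge i p with hh | hh
      · omega
      · exfalso; have : p = i := by omega
        subst this; exact e2 pd
    have ht : tau n = ((divOut n i).2 + 1) * tau (divOut n i).1 := by
      conv_lhs => rw [e1]
      exact tau_pow_mul _ _ _ hiprime e2
    rw [ih (by omega) e3 hp', ht]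
    ring
  | case2 n i acc h hd ih =>
    refine ih (by omega) h1 ?_
    intro p pp pd
    have := hp p pp pd
    rcases Nat.lt_or_ge i p with hh | hh
    · omega
    · exfalso; have : p = i := by omega
      subst this; exact hd pd
  | case3 n i acc h hn =>
    have hni : n < i * i := by
      rcases Nat.lt_or_ge n (i * i) with hh | hh
      · exact hh
      · exact absurd ⟨h2, hh⟩ h
    have hprime : n.Prime := prime_of_no_small_factor n i hn hni hp
    rw [tau, hprime.divisors, Finset.card_insert_of_notMem (by simp [(Nat.Prime.one_lt hprime).ne]),
      Finset.card_singleton]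
  | case4 n i acc h hn =>
    have : n = 1 := by omega
    subst this
    rw [tau, Nat.divisors_one, Finset.card_singleton, mul_one]

theorem bCount_eq (m : Nat) : bCount (m : Int) = (tau m : Int) := by
  unfold bCount
  rcases Nat.eq_zero_or_pos m with h | h
  · subst h; simp [tau]
  · rw [if_neg (by exact_mod_cast by omega : ¬ (m : Int) ≤ 0)]
    rw [Int.toNat_natCast]
    rw [factLoop_eq m 2 1 (le_refl 2) h (fun p pp _ => pp.two_le)]
    simp

-- ---- the two outer loops agree step for step on every input Pre_ admits ----
theorem loop_eq (m : Nat) (K : Int) (ops : Int) (fuel : Nat) (hf : m + 1 ≤ fuel)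
    (hpre : K ≤ 0 ∨ ∃ m' ∈ Finset.Icc 1 m, (K : Int) ≤ (tau m' : Int)) :
    coLoop fuel ((m : Int) + 1) K ops = bLoop m K ops := by
  induction m generalizing ops fuel with
  | zero =>
    obtain ⟨f, rfl⟩ : ∃ f, fuel = f + 1 := ⟨fuel - 1, by omega⟩
    have e0 : ((0 : Nat) : Int) + 1 - 1 = ((0 : Nat) : Int) := by ring
    rw [coLoop, bLoop, e0, find_divisors_eq, bCount_eq]
    rcases lt_trichotomy ((tau 0 : Nat) : Int) K with hlt | heq | hgt
    · exfalso
      rcases hpre with hK | ⟨m', hm', _⟩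
      · have : (0 : Int) ≤ ((tau 0 : Nat) : Int) := by positivity
        omega
      · exact absurd hm' (by simp)
    · rw [if_pos heq, if_pos heq]
    · rw [if_neg (by omega : ¬ ((tau 0 : Nat) : Int) = K),
        if_pos hgt, if_neg (by omega : ¬ ((tau 0 : Nat) : Int) = K), if_pos hgt]
  | succ m0 ihm =>
    obtain ⟨f, rfl⟩ : ∃ f, fuel = f + 1 := ⟨fuel - 1, by omega⟩
    have e0 : ((m0 + 1 : Nat) : Int) + 1 - 1 = ((m0 + 1 : Nat) : Int) := by ring
    rw [coLoop, bLoop, e0, find_divisors_eq, bCount_eq]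
    rcases lt_trichotomy ((tau (m0 + 1) : Nat) : Int) K with hlt | heq | hgt
    · rw [if_neg (by omega : ¬ ((tau (m0+1) : Nat) : Int) = K),
        if_neg (by omega : ¬ ((tau (m0+1) : Nat) : Int) > K), if_pos hlt,
        if_neg (by omega : ¬ ((tau (m0+1) : Nat) : Int) = K),
        if_neg (by omega : ¬ ((tau (m0+1) : Nat) : Int) > K)]
      have e1 : ((m0 + 1 : Nat) : Int) = ((m0 : Nat) : Int) + 1 := by push_cast; ring
      rw [e1]
      apply ihm _ f (by omega)
      rcases hpre with hK | ⟨m', hm', hK⟩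
      · exfalso; omega
      · right
        refine ⟨m', ?_, hK⟩
        simp only [Finset.mem_Icc] at hm' ⊢
        have : m' ≠ m0 + 1 := by
          intro hc; subst hc; omega
        omega
    · rw [if_pos heq, if_pos heq]
    · rw [if_neg (by omega : ¬ ((tau (m0+1) : Nat) : Int) = K),
        if_pos hgt, if_neg (by omega : ¬ ((tau (m0+1) : Nat) : Int) = K), if_pos hgt]

-- ===== VERDICT (by name: the statement is the Claim_ definition above) =====
theorem check_ops_negative_spec : Claim_equal_check_ops_negative := by
  intro num K hdom hpre
  obtain ⟨h1, hpre2⟩ := hpre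
  unfold Spec_check_ops_negative check_ops_negative check_ops_negative_alt
  rw [if_neg (by omega : ¬ num - 1 < 0)]
  have hm : num = (((num - 1).toNat : Nat) : Int) + 1 := by omega
  have hfuel : (num - 1).toNat + 1 ≤ num.toNat + 1 := by omega
  rw [show coLoop (num.toNat + 1) num K 0
      = coLoop (num.toNat + 1) ((((num - 1).toNat : Nat) : Int) + 1) K 0 from by rw [← hm]]
  exact loop_eq (num - 1).toNat K 0 (num.toNat + 1) (by omega) hpre2
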